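-- pv_equiv track=rewrite | github.com/psvishnu91/interview-problems | leetcode/433-minimum-genetic-mutation.py | _iter_mutations
-- ===== SOURCE A (Python) =====
-- def _iter_mutations(gene, bank):
--     mutant = list(gene)
--     for i, orig_c in enumerate(gene):
--         for c in ['A', 'C', 'G', 'T']:
--             if c == orig_c:
--                 continue
--             mutant[i] = c
--             mutant_str = ''.join(mutant)
--             if mutant_str in bank:
--                 yield mutant_str
--             mutant[i] = orig_c
-- ===== SOURCE B (Python) =====
-- def _iter_mutations(gene, bank):
--     # Index bank by (diff position, diff char) in one pass, then walk positions/chars.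
--     n = len(gene)
--     index = {}
--     for g in bank:
--         if len(g) != n:
--             continue
--         diffs = [i for i in range(n) if g[i] != gene[i]]
--         if len(diffs) == 1 and g[diffs[0]] in 'ACGT':
--             index[(diffs[0], g[diffs[0]])] = g
--     for i in range(n):
--         for c in 'ACGT':
--             if (i, c) in index:
--                 yield index[(i, c)]
-- ===== Notes on version B (the rewrite author's own statement) =====
-- stated objective: faster
-- what changed: Instead of generating every one-char mutant of gene and scanning bank for each, B makes one pass over bank classifying each entry by its single differing (position, char) into a dict, then walks positions and ACGT emitting dict hits, removing the inner bank scan and mutant-string construction.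
import Mathlib
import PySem

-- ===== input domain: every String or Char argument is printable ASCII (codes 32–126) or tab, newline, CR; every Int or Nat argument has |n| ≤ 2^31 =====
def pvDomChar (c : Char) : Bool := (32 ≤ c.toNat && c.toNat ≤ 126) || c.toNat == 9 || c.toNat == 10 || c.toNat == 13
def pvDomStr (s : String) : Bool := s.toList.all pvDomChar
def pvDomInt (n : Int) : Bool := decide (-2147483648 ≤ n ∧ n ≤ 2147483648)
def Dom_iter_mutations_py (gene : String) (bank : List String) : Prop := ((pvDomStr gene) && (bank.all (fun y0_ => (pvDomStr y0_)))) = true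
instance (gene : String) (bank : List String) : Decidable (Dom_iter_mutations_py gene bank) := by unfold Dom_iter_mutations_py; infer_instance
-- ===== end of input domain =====

-- B replaces A's generate-mutants-and-scan-bank loop by a one-pass (position,char) index over bank; return-value equivalence proved.


-- ===== PORT A =====
def iter_mutations_py (gene : String) (bank : List String) : List String :=
  let mutant := gene.toList
  (PySem.List.enumerate gene.toList).foldl (fun acc p =>
    (['A', 'C', 'G', 'T'] : List Char).foldl (fun acc c =>
      if c = p.2 then acc
      else
        let mutant_str := String.ofList (mutant.set p.1.toNat c)
        if mutant_str ∈ bank then acc ++ [mutant_str] else acc) acc) []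

-- ===== PORT B =====
def pvACGT : List Char := ['A', 'C', 'G', 'T']

-- one bank entry of B's index-building loop
def pvStep (gl : List Char) (n : Nat) (d : PySem.Dict (Nat × Char) String) (g : String) :
    PySem.Dict (Nat × Char) String :=
  let g2 := g.toList
  if g2.length ≠ n then d
  else
    -- diffs = [i for i in range(n) if g[i] != gene[i]]  (indices all in range, so getD is exact)
    match (List.range n).filter (fun j => g2.getD j ' ' ≠ gl.getD j ' ') with
    | [i] =>
        let c := g2.getD i ' '
        if c ∈ pvACGT then d.insert (i, c) g else d
    | _ => d

def iter_mutations_py_alt (gene : String) (bank : List String) : List String :=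
  let gl := gene.toList
  let n := gl.length
  let index := bank.foldl (pvStep gl n) PySem.Dict.empty
  (List.range n).foldl (fun out i =>
    pvACGT.foldl (fun out c =>
      match index.get? (i, c) with
      | some g => out ++ [g]
      | none => out) out) []

-- ===== PRECONDITION & SPEC =====
def Spec_iter_mutations_py (gene : String) (bank : List String) (out : List String) : Prop := out = iter_mutations_py_alt gene bank
instance (gene : String) (bank : List String) (out : List String) : Decidable (Spec_iter_mutations_py gene bank out) := by unfold Spec_iter_mutations_py; infer_instance

-- ===== CLAIM (what is proved, stated in full; the proofs are below) =====
def Claim_equal_iter_mutations_py : Prop := ∀ (gene : String) (bank : List String), Dom_iter_mutations_py gene bank → Spec_iter_mutations_py gene bank (iter_mutations_py gene bank)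

-- ===== LEMMAS AND PROOFS =====

-- the unique string differing from gl exactly at position i, where it holds c
def pvStr (gl : List Char) (i : Nat) (c : Char) : String := String.ofList (gl.set i c)

-- "g qualifies for key (i, c)": the Bool test B's index-building loop performs on a bank entry
def pvQualB (gl : List Char) (g : String) (i : Nat) (c : Char) : Bool :=
  (g.toList.length == gl.length) &&
  ((List.range gl.length).filter (fun j => g.toList.getD j ' ' ≠ gl.getD j ' ') == [i]) &&
  (g.toList.getD i ' ' == c) && decide (c ∈ pvACGT)

theorem pv_filter_sing_intro (p : Nat → Bool) (n i : Nat) (hi : i < n) (hpi : p i = true)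
    (h : ∀ j, j < n → p j = true → j = i) : (List.range n).filter p = [i] := by
  induction n with
  | zero => omega
  | succ m ih =>
    rw [List.range_succ, List.filter_append]
    by_cases him : i = m
    · have h0 : (List.range m).filter p = [] := List.filter_eq_nil_iff.mpr (by
        intro j hj hp
        have hjm : j < m := List.mem_range.mp hj
        have := h j (by omega) hp
        omega)
      subst him
      rw [h0]
      simp [hpi]
    · have hi' : i < m := by omega
      rw [ih hi' (fun j hj hp => h j (by omega) hp)]
      have hpm : p m = false := by
        by_contra hc
        have hpm' : p m = true := by
          cases hpmv : p m with
          | true => rfl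
          | false => exact absurd hpmv hc
        have := h m (by omega) hpm'
        omega
      simp [hpm]

theorem pv_filter_sing_elim {p : Nat → Bool} {n i : Nat}
    (h : (List.range n).filter p = [i]) :
    i < n ∧ p i = true ∧ ∀ j, j < n → p j = true → j = i := by
  have hi : i ∈ (List.range n).filter p := by rw [h]; exact List.mem_singleton_self i
  rw [List.mem_filter, List.mem_range] at hi
  refine ⟨hi.1, hi.2, fun j hj hpj => ?_⟩
  have hjmem : j ∈ (List.range n).filter p := by
    rw [List.mem_filter, List.mem_range]; exact ⟨hj, hpj⟩
  rw [h] at hjmem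
  simpa using hjmem

theorem pv_qual_iff (gl : List Char) (g : String) (i : Nat) (c : Char) :
    pvQualB gl g i c = true ↔
      i < gl.length ∧ c ∈ pvACGT ∧ ¬ c = gl.getD i ' ' ∧ g = pvStr gl i c := by
  unfold pvQualB pvStr
  simp only [Bool.and_eq_true, beq_iff_eq, decide_eq_true_eq]
  constructor
  · rintro ⟨⟨⟨hlen, hfil⟩, hgc⟩, hmem⟩
    obtain ⟨hi, hpi, hall⟩ := pv_filter_sing_elim hfil
    have hpi' : g.toList.getD i ' ' ≠ gl.getD i ' ' := by simpa using hpi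
    refine ⟨hi, hmem, by rw [← hgc]; exact hpi', ?_⟩
    have hgl : i < g.toList.length := by omega
    have htl : g.toList = gl.set i c := by
      apply List.ext_getElem
      · simp [hlen]
      · intro j hj1 hj2
        have hjlt : j < gl.length := by simpa using hj2
        by_cases hji : j = i
        · subst hji
          rw [List.getElem_set_self]
          rw [← List.getD_eq_getElem g.toList ' ' hj1]
          exact hgc
        · have hpj : ¬ (g.toList.getD j ' ' ≠ gl.getD j ' ') := by
            intro hd
            exact hji (hall j hjlt (by simpa using hd))
          rw [not_not] at hpj
          rw [List.getElem_set_ne (fun h => hji h.symm)]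
          rw [← List.getD_eq_getElem g.toList ' ' hj1, ← List.getD_eq_getElem gl ' ' hjlt]
          exact hpj
    rw [← htl]
    simp
  · rintro ⟨hi, hmem, hne, rfl⟩
    have htl : (String.ofList (gl.set i c)).toList = gl.set i c := by simp
    have hgdi : (gl.set i c).getD i ' ' = c := by
      rw [List.getD_eq_getElem _ ' ' (by simpa using hi), List.getElem_set_self]
    refine ⟨⟨⟨by rw [htl]; simp, ?_⟩, by rw [htl]; exact hgdi⟩, hmem⟩
    rw [htl]
    apply pv_filter_sing_intro _ _ _ hi
    · simp only [decide_eq_true_eq]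
      rw [hgdi]
      intro hcc
      exact hne hcc
    · intro j hj hp
      by_contra hji
      simp only [decide_eq_true_eq] at hp
      apply hp
      rw [List.getD_eq_getElem _ ' ' (by simpa using hj),
          List.getElem_set_ne (fun h => hji h.symm),
          List.getD_eq_getElem gl ' ' hj]

theorem pv_qual_false_of_filter {gl : List Char} {g : String} (i : Nat) (c : Char)
    {L : List Nat}
    (hd : (List.range gl.length).filter
        (fun j => g.toList.getD j ' ' ≠ gl.getD j ' ') = L)
    (hL : ∀ i' : Nat, L ≠ [i']) :
    pvQualB gl g i c = false := by
  cases hv : pvQualB gl g i c with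
  | false => rfl
  | true =>
    exfalso
    unfold pvQualB at hv
    simp only [Bool.and_eq_true, beq_iff_eq] at hv
    obtain ⟨⟨⟨_, hfil⟩, _⟩, _⟩ := hv
    exact hL i (hd ▸ hfil)

theorem pv_step_get (gl : List Char) (d : PySem.Dict (Nat × Char) String) (g : String)
    (i : Nat) (c : Char) :
    (pvStep gl gl.length d g).get? (i, c)
      = if pvQualB gl g i c then some g else d.get? (i, c) := by
  unfold pvStep
  by_cases hlen : g.toList.length = gl.length
  · rw [if_neg (by simpa using hlen)]
    rcases hd : (List.range gl.length).filter
        (fun j => decide (g.toList.getD j ' ' ≠ gl.getD j ' ')) with _ | ⟨i0, tl⟩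
    · rw [pv_qual_false_of_filter i c hd (by intro i' h; cases h)]
      simp
    · rcases tl with _ | ⟨j0, tl'⟩
      · dsimp only
        by_cases hm : g.toList.getD i0 ' ' ∈ pvACGT
        · rw [if_pos hm, PySem.Dict.get?_insert]
          by_cases hic : (i, c) = (i0, g.toList.getD i0 ' ')
          · rw [Prod.mk.injEq] at hic
            obtain ⟨h1, h2⟩ := hic
            have hq : pvQualB gl g i c = true := by
              unfold pvQualB
              simp only [Bool.and_eq_true, beq_iff_eq, decide_eq_true_eq]
              refine ⟨⟨⟨hlen, by rw [hd, h1]⟩, by rw [h1]; exact h2.symm⟩,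
                by rw [h2]; exact hm⟩
            rw [if_pos (by rw [Prod.mk.injEq]; exact ⟨h1, h2⟩), hq, if_pos rfl]
          · have hq : pvQualB gl g i c = false := by
              cases hv : pvQualB gl g i c with
              | false => rfl
              | true =>
                exfalso
                unfold pvQualB at hv
                simp only [Bool.and_eq_true, beq_iff_eq] at hv
                obtain ⟨⟨⟨_, hfil⟩, hgc⟩, _⟩ := hv
                rw [hd] at hfil
                have hii : i0 = i := by injection hfil
                apply hic
                rw [Prod.mk.injEq]
                exact ⟨hii.symm, by rw [← hii] at hgc; exact hgc.symm⟩
            rw [if_neg (by rwa [Prod.mk.injEq] at hic ⊢), hq]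
            simp
        · rw [if_neg hm]
          have hq : pvQualB gl g i c = false := by
            cases hv : pvQualB gl g i c with
            | false => rfl
            | true =>
              exfalso
              unfold pvQualB at hv
              simp only [Bool.and_eq_true, beq_iff_eq, decide_eq_true_eq] at hv
              obtain ⟨⟨⟨_, hfil⟩, hgc⟩, hmem⟩ := hv
              rw [hd] at hfil
              have hii : i0 = i := by injection hfil
              apply hm
              rw [hii, hgc]
              exact hmem
          rw [hq]
          simp
      · rw [pv_qual_false_of_filter i c hd (by intro i' h; cases h)]
        simp
  · rw [if_pos (by simpa using hlen)]
    have hq : pvQualB gl g i c = false := by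
      cases hv : pvQualB gl g i c with
      | false => rfl
      | true =>
        exfalso
        unfold pvQualB at hv
        simp only [Bool.and_eq_true, beq_iff_eq] at hv
        exact hlen hv.1.1.1
    rw [hq]
    simp

theorem pv_fold_get (gl : List Char) (i : Nat) (c : Char)
    (bank : List String) :
    ∀ (d : PySem.Dict (Nat × Char) String),
    (bank.foldl (pvStep gl gl.length) d).get? (i, c)
      = if bank.any (fun g => pvQualB gl g i c) then some (pvStr gl i c)
        else d.get? (i, c) := by
  induction bank with
  | nil => intro d; simp
  | cons g rest ih =>
    intro d
    rw [List.foldl_cons, ih, pv_step_get]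
    by_cases hr : rest.any (fun g => pvQualB gl g i c)
    · simp [hr, List.any_cons]
    · by_cases hq : pvQualB gl g i c = true
      · have hg : g = pvStr gl i c := ((pv_qual_iff gl g i c).mp hq).2.2.2
        simp [hr, List.any_cons, hg]
      · simp [hr, hq, List.any_cons]

theorem pv_main (gene : String) (bank : List String) :
    iter_mutations_py gene bank = iter_mutations_py_alt gene bank := by
  unfold iter_mutations_py iter_mutations_py_alt
  dsimp only
  rw [PySem.List.enumerate_eq_map_pyRange gene.toList ' ', List.foldl_map,
      PySem.List.pyRange_one, List.foldl_map]
  simp only [PySem.List.len_eq, sub_zero, Int.toNat_natCast, zero_add]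
  apply List.foldl_ext
  intro acc k hk
  have hklt : k < gene.toList.length := List.mem_range.mp hk
  simp only [PySem.List.pyGetD_natCast, pvACGT]
  apply List.foldl_ext
  intro out c hc
  dsimp only
  rw [pv_fold_get, PySem.Dict.get?_empty]
  by_cases h1 : c = gene.toList.getD k ' '
  · have hfalse : bank.any (fun g => pvQualB gene.toList g k c) = false := by
      cases hv : bank.any (fun g => pvQualB gene.toList g k c) with
      | false => rfl
      | true =>
        exfalso
        obtain ⟨g, hg, hqg⟩ := List.any_eq_true.mp hv
        exact ((pv_qual_iff gene.toList g k c).mp hqg).2.2.1 h1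
    rw [if_pos h1, hfalse]
    simp
  · rw [if_neg h1]
    have hcm : c ∈ pvACGT := by simpa [pvACGT] using hc
    by_cases h2 : String.ofList (gene.toList.set k c) ∈ bank
    · have htrue : bank.any (fun g => pvQualB gene.toList g k c) = true :=
        List.any_eq_true.mpr ⟨_, h2, (pv_qual_iff gene.toList _ k c).mpr ⟨hklt, hcm, h1, rfl⟩⟩
      rw [htrue]
      simp [pvStr, h2]
    · have hfalse : bank.any (fun g => pvQualB gene.toList g k c) = false := by
        cases hv : bank.any (fun g => pvQualB gene.toList g k c) with
        | false => rfl
        | true =>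
          exfalso
          obtain ⟨g, hg, hqg⟩ := List.any_eq_true.mp hv
          have hgv : g = pvStr gene.toList k c := ((pv_qual_iff gene.toList g k c).mp hqg).2.2.2
          exact h2 (by
            rw [show String.ofList (gene.toList.set k c) = pvStr gene.toList k c from rfl,
              ← hgv]
            exact hg)
      rw [hfalse]
      simp [h2]

-- ===== VERDICT (by name: the statement is the Claim_ definition above) =====
theorem iter_mutations_py_spec : Claim_equal_iter_mutations_py := by
  intro gene bank _
  unfold Spec_iter_mutations_py
  exact pv_main gene bank
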